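-- pv_equiv track=rewrite | github.com/Qiskit/qiskit | qiskit/circuit/annotation.py | iter_namespaces
-- ===== SOURCE A (Python) =====
-- from typing import Literal, Iterator
--
-- def iter_namespaces(namespace: str) -> Iterator[str]:
--     """An iterator over all namespaces that can be used to lookup the given namespace.
--
--     This includes the namespace and all parents, including the root empty-string namespace.
--
--     Examples:
--
--     .. code-block:: python
--
--         from qiskit.circuit.annotation import iter_namespaces
--         assert list(iter_namespaces("hello.world")) == ["hello.world", "hello", ""]
--     """
--     while namespace:
--         yield namespace
--         split = namespace.rsplit(".", 1)
--         if len(split) == 1: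
--             break
--         namespace = split[0]
--     yield ""
-- ===== SOURCE B (Python) =====
-- def iter_namespaces(namespace: str):
--     parts = namespace.split(".")
--     for i in range(len(parts), 0, -1):
--         prefix = ".".join(parts[:i])
--         if not prefix:
--             break
--         yield prefix
--     yield ""
-- ===== Notes on version B (the rewrite author's own statement) =====
-- stated objective: alternative
-- what changed: B splits the namespace into its dot-separated components once and reconstructs each ancestor by joining a shrinking prefix of that component list, instead of A's repeated rsplit-stripping of a running string.
import Mathlib
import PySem

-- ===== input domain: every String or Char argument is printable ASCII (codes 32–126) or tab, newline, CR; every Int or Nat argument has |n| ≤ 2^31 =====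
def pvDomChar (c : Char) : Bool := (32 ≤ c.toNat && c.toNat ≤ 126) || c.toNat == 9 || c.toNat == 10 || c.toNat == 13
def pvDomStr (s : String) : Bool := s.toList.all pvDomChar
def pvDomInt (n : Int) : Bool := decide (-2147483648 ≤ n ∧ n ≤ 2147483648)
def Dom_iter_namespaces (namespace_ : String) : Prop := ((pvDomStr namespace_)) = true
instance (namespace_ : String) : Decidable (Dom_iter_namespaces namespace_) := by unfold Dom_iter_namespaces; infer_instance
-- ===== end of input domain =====

-- B rebuilds each ancestor namespace from a once-computed component list instead of A's
-- repeated rsplit-stripping of a running string; objective: alternative (same cost).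

-- ===== PORT A =====
-- hand port of `rsplit('.', 1)`'s search for the split point: scanning the REVERSED string,
-- drop characters up to and including the first '.' (i.e. the LAST '.' of the string);
-- `none` means no '.' present (rsplit returned a single piece). Exact for a 1-char separator.
def dropAfterLastDot : List Char → Option (List Char)
  | [] => none
  | c :: rest => if c = '.' then some rest else dropAfterLastDot rest

theorem dropAfterLastDot_length : ∀ (xs r : List Char), dropAfterLastDot xs = some r → r.length < xs.length := by
  intro xs
  induction xs with
  | nil => intro r h; simp [dropAfterLastDot] at h
  | cons c rest ih =>
    intro r h
    simp only [dropAfterLastDot] at h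
    split at h
    · cases h; simp
    · exact Nat.lt_trans (ih r h) (by simp)

-- the while-loop of A, on the char list of the running string:
-- while namespace: yield namespace; split at the last '.' (break if none); continue on the left part.
def iterA (cs : List Char) : List (List Char) :=
  if cs = [] then [[]]
  else
    cs :: (match h : dropAfterLastDot cs.reverse with
      | none => [[]]                      -- len(split) == 1: break, then yield ""
      | some r => iterA r.reverse)        -- namespace = split[0]
termination_by cs.length
decreasing_by
  have := dropAfterLastDot_length cs.reverse r h
  simpa using this

def iter_namespaces (namespace_ : String) : List String :=
  (iterA namespace_.toList).map String.mk

-- ===== PORT B =====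
-- hand port of `namespace.split('.')` (exact for a 1-char separator)
def splitDot : List Char → List (List Char)
  | [] => [[]]
  | c :: rest =>
    if c = '.' then [] :: splitDot rest
    else
      match splitDot rest with
      | [] => [[c]]                       -- unreachable: splitDot never returns []
      | p :: ps => (c :: p) :: ps

-- hand port of `'.'.join(parts)`
def joinDot : List (List Char) → List Char
  | [] => []
  | [p] => p
  | p :: ps => p ++ '.' :: joinDot ps

-- the for-loop of B: i runs from parts.length down to 1; prefix = '.'.join(parts[:i]);
-- break on empty prefix; trailing yield "".
def altLoopC (parts : List (List Char)) : Nat → List (List Char)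
  | 0 => [[]]
  | i + 1 =>
    let pre := joinDot (parts.take (i + 1))
    if pre = [] then [[]] else pre :: altLoopC parts i

def iter_namespaces_alt (namespace_ : String) : List String :=
  let parts := splitDot namespace_.toList
  (altLoopC parts parts.length).map String.mk

-- ===== PRECONDITION & SPEC =====
def Spec_iter_namespaces (namespace_ : String) (out : List String) : Prop := out = iter_namespaces_alt namespace_
instance (namespace_ : String) (out : List String) : Decidable (Spec_iter_namespaces namespace_ out) := by unfold Spec_iter_namespaces; infer_instance

-- ===== CLAIM (what is proved, stated in full; the proofs are below) =====
def Claim_equal_iter_namespaces : Prop := ∀ (namespace_ : String), Dom_iter_namespaces namespace_ → Spec_iter_namespaces namespace_ (iter_namespaces namespace_)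

-- ===== LEMMAS AND PROOFS =====

theorem splitDot_ne_nil (cs : List Char) : splitDot cs ≠ [] := by
  cases cs with
  | nil => simp [splitDot]
  | cons c rest =>
    simp only [splitDot]
    split
    · simp
    · split <;> simp

theorem splitDot_no_dot (u : List Char) (h : '.' ∉ u) : splitDot u = [u] := by
  induction u with
  | nil => rfl
  | cons c rest ih =>
    simp only [List.mem_cons, not_or] at h
    have hc : ¬ c = '.' := fun hc => h.1 hc.symm
    simp [splitDot, hc, ih h.2]

theorem splitDot_append_dot (v u : List Char) (h : '.' ∉ u) :
    splitDot (v ++ '.' :: u) = splitDot v ++ [u] := by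
  induction v with
  | nil => simp [splitDot, splitDot_no_dot u h]
  | cons c v ih =>
    simp only [List.cons_append, splitDot, ih]
    split
    · simp
    · cases hv : splitDot v with
      | nil => exact absurd hv (splitDot_ne_nil v)
      | cons p ps => simp

theorem joinDot_splitDot (cs : List Char) : joinDot (splitDot cs) = cs := by
  induction cs with
  | nil => rfl
  | cons c rest ih =>
    simp only [splitDot]
    split
    · rename_i hc
      subst hc
      cases hr : splitDot rest with
      | nil => exact absurd hr (splitDot_ne_nil rest)
      | cons p ps => rw [hr] at ih; simp [joinDot, ih]
    · cases hr : splitDot rest with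
      | nil => exact absurd hr (splitDot_ne_nil rest)
      | cons p ps =>
        rw [hr] at ih
        cases ps with
        | nil => simp only [joinDot] at ih ⊢; rw [ih]
        | cons q qs =>
          simp only [joinDot, List.cons_append] at ih ⊢
          rw [ih]

theorem dropAfterLastDot_no_dot (r : List Char) (h : '.' ∉ r) : dropAfterLastDot r = none := by
  induction r with
  | nil => rfl
  | cons c rest ih =>
    simp only [List.mem_cons, not_or] at h
    have hc : ¬ c = '.' := fun hc => h.1 hc.symm
    simp only [dropAfterLastDot, if_neg hc]
    exact ih h.2

theorem dropAfterLastDot_append (r w : List Char) (h : '.' ∉ r) :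
    dropAfterLastDot (r ++ '.' :: w) = some w := by
  induction r with
  | nil => simp [dropAfterLastDot]
  | cons c rest ih =>
    simp only [List.mem_cons, not_or] at h
    have hc : ¬ c = '.' := fun hc => h.1 hc.symm
    simp only [List.cons_append, dropAfterLastDot, if_neg hc]
    exact ih h.2

theorem exists_last_dot (cs : List Char) (h : '.' ∈ cs) :
    ∃ v u, cs = v ++ '.' :: u ∧ '.' ∉ u := by
  induction cs with
  | nil => simp at h
  | cons c rest ih =>
    by_cases hr : '.' ∈ rest
    · obtain ⟨v, u, hvu, hu⟩ := ih hr
      exact ⟨c :: v, u, by simp [hvu], hu⟩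
    · have hc : c = '.' := by
        rcases List.mem_cons.mp h with h1 | h2
        · exact h1.symm
        · exact absurd h2 hr
      exact ⟨[], rest, by simp [hc], hr⟩

theorem iterA_nil : iterA [] = [[]] := by
  rw [iterA]
  simp

theorem iterA_no_dot (cs : List Char) (h : cs ≠ [])
    (hd : dropAfterLastDot cs.reverse = none) : iterA cs = [cs, []] := by
  rw [iterA, if_neg h]
  split
  · rfl
  · rename_i r heq
    rw [hd] at heq
    cases heq

theorem iterA_some (cs r : List Char) (h : cs ≠ [])
    (hd : dropAfterLastDot cs.reverse = some r) : iterA cs = cs :: iterA r.reverse := by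
  rw [iterA, if_neg h]
  split
  · rename_i heq
    rw [hd] at heq
    cases heq
  · rename_i r' heq
    rw [hd] at heq
    injection heq with heq
    rw [heq]

theorem altLoopC_take (ps : List (List Char)) (u : List Char) :
    ∀ i, i ≤ ps.length → altLoopC (ps ++ [u]) i = altLoopC ps i := by
  intro i
  induction i with
  | zero => intro _; rfl
  | succ i ih =>
    intro hi
    simp only [altLoopC, List.take_append_of_le_length hi, ih (Nat.le_of_succ_le hi)]

theorem iterA_eq_alt : ∀ (cs : List Char),
    iterA cs = altLoopC (splitDot cs) (splitDot cs).length := by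
  intro cs
  induction hn : cs.length using Nat.strong_induction_on generalizing cs with
  | _ n ih =>
  by_cases hnil : cs = []
  · subst hnil
    rw [iterA_nil]
    simp [splitDot, altLoopC, joinDot]
  · by_cases hdot : '.' ∈ cs
    · obtain ⟨v, u, hvu, hu⟩ := exists_last_dot cs hdot
      subst hvu
      have hsplit : splitDot (v ++ '.' :: u) = splitDot v ++ [u] := splitDot_append_dot v u hu
      have hdrop : dropAfterLastDot (v ++ '.' :: u).reverse = some v.reverse := by
        rw [show (v ++ '.' :: u).reverse = u.reverse ++ '.' :: v.reverse by simp]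
        exact dropAfterLastDot_append u.reverse v.reverse (by simpa using hu)
      have hv : iterA v = altLoopC (splitDot v) (splitDot v).length :=
        ih v.length (by subst hn; simp) v rfl
      rw [iterA_some _ _ hnil hdrop, List.reverse_reverse, hv, hsplit]
      have hjoin : joinDot ((splitDot v ++ [u]).take ((splitDot v).length + 1)) = v ++ '.' :: u := by
        rw [List.take_of_length_le (by simp), ← hsplit, joinDot_splitDot]
      rw [show (splitDot v ++ [u]).length = (splitDot v).length + 1 by simp]
      rw [altLoopC, hjoin, if_neg (by simp)]
      rw [altLoopC_take (splitDot v) u (splitDot v).length (le_refl _)]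
    · have hsplit : splitDot cs = [cs] := splitDot_no_dot cs hdot
      have hdrop : dropAfterLastDot cs.reverse = none :=
        dropAfterLastDot_no_dot cs.reverse (by simpa using hdot)
      rw [iterA_no_dot cs hnil hdrop, hsplit]
      simp [altLoopC, joinDot, hnil]

-- ===== VERDICT (by name: the statement is the Claim_ definition above) =====
theorem iter_namespaces_spec : Claim_equal_iter_namespaces := by
  intro namespace_ _
  unfold Spec_iter_namespaces iter_namespaces iter_namespaces_alt
  rw [iterA_eq_alt]
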